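-- pv_equiv track=rewrite | github.com/a-shigemichi/leetcode | 1630_Arithmetic_Subarrays.py | canFormArithmeticSequence
-- ===== SOURCE A (Python) =====
-- def canFormArithmeticSequence(arr):
--     if len(arr) <= 1:
--         return True
--
--     arr.sort()
--     diff = arr[1] - arr[0]
--
--     for i in range(2, len(arr)):
--         if arr[i] - arr[i-1] != diff:
--             return False
--
--     return True
-- ===== SOURCE B (Python) =====
-- def canFormArithmeticSequence(arr):
--     n = len(arr)
--     if n <= 1:
--         return True
--     mn = min(arr)
--     mx = max(arr)
--     if mn == mx:
--         return True
--     if (mx - mn) % (n - 1) != 0: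
--         return False
--     d = (mx - mn) // (n - 1)
--     s = set(arr)
--     if len(s) != n:
--         return False
--     return all(mn + i * d in s for i in range(n))
-- ===== Notes on version B (the rewrite author's own statement) =====
-- stated objective: alternative
-- what changed: Replaced sort-then-scan with a single-pass min/max + divisibility + set-membership check (no sorting); B also does not mutate the input list, while A sorts it in place.
import Mathlib
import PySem

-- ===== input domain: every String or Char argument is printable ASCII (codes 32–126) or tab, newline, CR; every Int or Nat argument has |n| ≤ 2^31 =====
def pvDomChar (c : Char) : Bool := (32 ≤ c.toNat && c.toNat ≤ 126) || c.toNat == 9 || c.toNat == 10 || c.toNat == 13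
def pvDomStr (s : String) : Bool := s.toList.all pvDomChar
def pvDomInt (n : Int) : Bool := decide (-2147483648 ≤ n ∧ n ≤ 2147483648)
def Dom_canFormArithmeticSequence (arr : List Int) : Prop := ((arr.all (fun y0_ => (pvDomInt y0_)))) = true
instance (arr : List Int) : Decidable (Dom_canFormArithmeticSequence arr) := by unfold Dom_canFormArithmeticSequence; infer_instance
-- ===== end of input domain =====

-- B replaces A's sort-then-scan with a min/max + divisibility + set-membership check (no sorting);
-- return values agree everywhere, but A sorts the input list in place while B leaves it unchanged
-- (the equivalence proved here is about the return value only).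

-- ===== PORT A =====
-- A: sort the list, then scan that every consecutive difference equals arr[1] - arr[0].
def canFormArithmeticSequence (arr : List Int) : Bool :=
  if arr.length ≤ 1 then true
  else
    let s := PySem.List.sorted arr (fun x => x) false
    let diff := PySem.List.pyGetD s 1 0 - PySem.List.pyGetD s 0 0
    (PySem.List.pyRange 2 (PySem.List.len s) 1).all
      (fun i => PySem.List.pyGetD s i 0 - PySem.List.pyGetD s (i - 1) 0 == diff)

-- ===== PORT B =====
-- B: min/max, divisibility of the span by n-1, then set membership of every expected term.
def canFormArithmeticSequence_alt (arr : List Int) : Bool :=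
  let n : Int := PySem.List.len arr
  if n ≤ 1 then true
  else
    let mn := (PySem.List.min? arr (fun x => x)).getD 0
    let mx := (PySem.List.max? arr (fun x => x)).getD 0
    if mn == mx then true
    else if PySem.Int.mod (mx - mn) (n - 1) != 0 then false
    else
      let d := PySem.Int.floordiv (mx - mn) (n - 1)
      let s := PySem.Set.ofList arr
      if PySem.Set.len s != n then false
      else (PySem.List.pyRange 0 n 1).all (fun i => PySem.Set.contains s (mn + i * d))

-- ===== PRECONDITION & SPEC =====
def Spec_canFormArithmeticSequence (arr : List Int) (out : Bool) : Prop := out = canFormArithmeticSequence_alt arr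
instance (arr : List Int) (out : Bool) : Decidable (Spec_canFormArithmeticSequence arr out) := by unfold Spec_canFormArithmeticSequence; infer_instance

-- ===== CLAIM (what is proved, stated in full; the proofs are below) =====
def Claim_equal_canFormArithmeticSequence : Prop := ∀ (arr : List Int), Dom_canFormArithmeticSequence arr → Spec_canFormArithmeticSequence arr (canFormArithmeticSequence arr)

-- ===== LEMMAS AND PROOFS =====

def apList (a d : Int) (n : Nat) : List Int := (List.range n).map (fun (k : Nat) => a + (k : Int) * d)

theorem apList_length (a d : Int) (n : Nat) : (apList a d n).length = n := by
  simp [apList]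

theorem apList_getElem (a d : Int) (n k : Nat) (h : k < (apList a d n).length) :
    (apList a d n)[k] = a + k * d := by
  have hk : k < n := by rwa [apList_length] at h
  unfold apList
  rw [List.getElem_map, List.getElem_range]

theorem apList_getD (a d : Int) {n k : Nat} (hk : k < n) :
    (apList a d n).getD k 0 = a + k * d := by
  have hlen : k < (apList a d n).length := by rw [apList_length]; exact hk
  rw [List.getD_eq_getElem _ _ hlen, apList_getElem]

theorem apList_pairwise (a : Int) {d : Int} (hd : 0 < d) (n : Nat) :
    (apList a d n).Pairwise (· < ·) := by
  rw [List.pairwise_iff_getElem]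
  intro i j hi hj hij
  rw [apList_getElem, apList_getElem]
  have : (i : Int) < (j : Int) := by exact_mod_cast hij
  nlinarith

theorem ofList_sublist (xs : List Int) : (PySem.Set.ofList xs).Sublist xs := by
  induction xs with
  | nil => simp [PySem.Set.ofList]
  | cons x xs ih =>
    rw [PySem.Set.ofList_cons]
    refine List.Sublist.cons₂ x ?_
    have h1 : ((PySem.Set.ofList xs).discard x).Sublist (PySem.Set.ofList xs) := by
      unfold PySem.Set.discard
      exact List.filter_sublist
    exact h1.trans ih

theorem pyGetD_toGetD (xs : List Int) {x : Int} (h0 : 0 ≤ x) (h1 : x < xs.length) :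
    PySem.List.pyGetD xs x 0 = xs.getD x.toNat 0 := by
  rw [PySem.List.pyGetD_eq_getElem xs 0 h0 (by exact_mod_cast h1),
      List.getD_eq_getElem _ _ (by omega)]

theorem chain_closed (l : List Int)
    (hc : ∀ i : Nat, 2 ≤ i → i < l.length → l.getD i 0 - l.getD (i-1) 0 = l.getD 1 0 - l.getD 0 0) :
    ∀ k : Nat, k < l.length → l.getD k 0 = l.getD 0 0 + k * (l.getD 1 0 - l.getD 0 0) := by
  intro k
  induction k with
  | zero => intro _; simp
  | succ k ih =>
    intro hk
    by_cases hk1 : k = 0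
    · subst hk1; push_cast; ring
    · have hck := hc (k+1) (by omega) hk
      have ihk := ih (by omega)
      have hs : (k+1) - 1 = k := by omega
      rw [hs] at hck
      have : l.getD (k+1) 0 = l.getD k 0 + (l.getD 1 0 - l.getD 0 0) := by linarith
      rw [this, ihk]
      push_cast; ring

theorem min_eq_sorted_head (arr : List Int) (h : arr ≠ []) :
    PySem.List.min? arr (fun x => x) = some ((PySem.List.sorted arr (fun x => x) false).getD 0 0) := by
  have hl : 0 < (PySem.List.sorted arr (fun x => x) false).length := by
    rw [PySem.List.length_sorted]; exact List.length_pos_of_ne_nil h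
  cases hm : PySem.List.min? arr (fun x => x) with
  | none => exact absurd (((PySem.List.min?_eq_none_iff _ _).mp hm)) h
  | some m =>
    congr 1
    have hmem : m ∈ arr := PySem.List.min?_mem hm
    have hmin : ∀ y ∈ arr, m ≤ y := PySem.List.min?_isMin hm
    rw [List.getD_eq_getElem _ _ hl]
    have h0mem : (PySem.List.sorted arr (fun x => x) false)[0] ∈ arr :=
      (PySem.List.sorted_perm arr (fun x => x) false).mem_iff.mp (List.getElem_mem hl)
    have hml : m ∈ PySem.List.sorted arr (fun x => x) false :=
      (PySem.List.sorted_perm arr (fun x => x) false).mem_iff.mpr hmem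
    obtain ⟨j, hj, hjm⟩ := List.getElem_of_mem hml
    have := PySem.List.sorted_id_getElem_mono arr (Nat.zero_le j) hj
    rw [hjm] at this
    exact le_antisymm (hmin _ h0mem) this

theorem max_eq_sorted_last (arr : List Int) (h : arr ≠ []) :
    PySem.List.max? arr (fun x => x) = some ((PySem.List.sorted arr (fun x => x) false).getD (arr.length - 1) 0) := by
  have hl : arr.length - 1 < (PySem.List.sorted arr (fun x => x) false).length := by
    rw [PySem.List.length_sorted]
    have := List.length_pos_of_ne_nil h
    omega
  cases hm : PySem.List.max? arr (fun x => x) with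
  | none => exact absurd (((PySem.List.max?_eq_none_iff _ _).mp hm)) h
  | some m =>
    congr 1
    have hmem : m ∈ arr := PySem.List.max?_mem hm
    have hmax : ∀ y ∈ arr, y ≤ m := PySem.List.max?_isMax hm
    rw [List.getD_eq_getElem _ _ hl]
    have h0mem : (PySem.List.sorted arr (fun x => x) false)[arr.length - 1] ∈ arr :=
      (PySem.List.sorted_perm arr (fun x => x) false).mem_iff.mp (List.getElem_mem hl)
    have hml : m ∈ PySem.List.sorted arr (fun x => x) false :=
      (PySem.List.sorted_perm arr (fun x => x) false).mem_iff.mpr hmem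
    obtain ⟨j, hj, hjm⟩ := List.getElem_of_mem hml
    have hj' : j ≤ arr.length - 1 := by
      rw [PySem.List.length_sorted] at hj; omega
    have := PySem.List.sorted_id_getElem_mono arr hj' hl
    rw [hjm] at this
    exact le_antisymm this (hmax _ h0mem)

theorem A_true_iff (arr : List Int) (h2 : 2 ≤ arr.length) :
    (canFormArithmeticSequence arr = true ↔
      ∀ k : Nat, k < arr.length →
        (PySem.List.sorted arr (fun x => x) false).getD k 0
          = (PySem.List.sorted arr (fun x => x) false).getD 0 0
            + k * ((PySem.List.sorted arr (fun x => x) false).getD 1 0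
                   - (PySem.List.sorted arr (fun x => x) false).getD 0 0)) := by
  set l := PySem.List.sorted arr (fun x => x) false with hl
  have hlen : l.length = arr.length := PySem.List.length_sorted arr _ _
  unfold canFormArithmeticSequence
  rw [if_neg (by omega)]
  rw [← hl]
  simp only [List.all_eq_true, PySem.List.len_eq, hlen, beq_iff_eq]
  constructor
  · intro H k hk
    rw [← hlen] at hk
    refine chain_closed l ?_ k hk
    intro i h2i hin
    rw [hlen] at hin
    have hmem : (i : Int) ∈ PySem.List.pyRange 2 (arr.length : Int) := by
      rw [PySem.List.mem_pyRange_one]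
      constructor
      · exact_mod_cast h2i
      · exact_mod_cast hin
    have hthis := H (i : Int) hmem
    rw [pyGetD_toGetD l (by omega) (by rw [hlen]; exact_mod_cast hin),
        pyGetD_toGetD l (by omega) (by rw [hlen]; omega),
        pyGetD_toGetD l (by omega) (by rw [hlen]; omega),
        pyGetD_toGetD l (by omega) (by rw [hlen]; omega)] at hthis
    have ht1 : ((i : Int)).toNat = i := by omega
    have ht2 : ((i : Int) - 1).toNat = i - 1 := by omega
    rw [ht1, ht2] at hthis
    simpa using hthis
  · intro H x hx
    rw [PySem.List.mem_pyRange_one] at hx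
    have hxlen : x < (arr.length : Int) := hx.2
    have hx2 : 2 ≤ x := hx.1
    rw [pyGetD_toGetD l (by omega) (by rw [hlen]; exact_mod_cast hxlen),
        pyGetD_toGetD l (by omega) (by rw [hlen]; omega),
        pyGetD_toGetD l (by omega) (by rw [hlen]; omega),
        pyGetD_toGetD l (by omega) (by rw [hlen]; omega)]
    have hxn : x.toNat < arr.length := by omega
    have hxn2 : 2 ≤ x.toNat := by omega
    have e1 := H x.toNat hxn
    have e2 := H (x.toNat - 1) (by omega)
    have e3 := H 1 (by omega)
    have ht2 : (x - 1).toNat = x.toNat - 1 := by omega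
    have ht3 : ((1 : Int)).toNat = 1 := by omega
    have ht4 : ((0 : Int)).toNat = 0 := by omega
    rw [ht2, ht3, ht4, e1, e2, e3]
    have hc : ((x.toNat - 1 : Nat) : Int) = (x.toNat : Int) - 1 := by omega
    rw [hc]
    ring

theorem canFormArithmeticSequence_eq (arr : List Int) :
    canFormArithmeticSequence arr = canFormArithmeticSequence_alt arr := by
  by_cases hn : arr.length ≤ 1
  · unfold canFormArithmeticSequence canFormArithmeticSequence_alt
    rw [if_pos hn, if_pos (by simp only [PySem.List.len_eq]; exact_mod_cast hn)]
  · have h2 : 2 ≤ arr.length := by omega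
    have hne : arr ≠ [] := by intro h; rw [h] at h2; simp at h2
    set l := PySem.List.sorted arr (fun x => x) false with hldef
    have hlen : l.length = arr.length := PySem.List.length_sorted arr _ _
    set g0 := l.getD 0 0 with hg0
    set gL := l.getD (arr.length - 1) 0 with hgL
    set nI : Int := (arr.length : Int) with hnI
    -- getD k is a member of arr
    have hmem : ∀ k : Nat, k < arr.length → l.getD k 0 ∈ arr := by
      intro k hk
      rw [List.getD_eq_getElem _ _ (by omega)]
      exact (PySem.List.sorted_perm arr (fun x => x) false).mem_iff.mp
        (List.getElem_mem (by rw [← hldef, hlen]; exact hk))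
    -- monotone getD
    have hmono : ∀ p q : Nat, p ≤ q → q < arr.length → l.getD p 0 ≤ l.getD q 0 := by
      intro p q hpq hq
      rw [List.getD_eq_getElem _ _ (by omega), List.getD_eq_getElem _ _ (by omega)]
      exact PySem.List.sorted_id_getElem_mono arr hpq (by rw [← hldef, hlen]; exact hq)
    -- unfold B
    have hB : canFormArithmeticSequence_alt arr =
        (if (g0 == gL) = true then true
         else if (PySem.Int.mod (gL - g0) (nI - 1) != 0) = true then false
         else if (PySem.Set.len (PySem.Set.ofList arr) != nI) = true then false
         else (PySem.List.pyRange 0 nI 1).all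
           (fun i => PySem.Set.contains (PySem.Set.ofList arr)
             (g0 + i * PySem.Int.floordiv (gL - g0) (nI - 1)))) := by
      unfold canFormArithmeticSequence_alt
      rw [min_eq_sorted_head arr hne, max_eq_sorted_last arr hne]
      simp only [PySem.List.len_eq, Option.getD_some, ← hldef, ← hg0, ← hgL, ← hnI]
      rw [if_neg (by omega)]
    rw [hB]
    by_cases heq : g0 = gL
    · -- all elements equal: both true
      rw [if_pos (by simp [heq])]
      rw [A_true_iff arr h2, ← hldef]
      intro k hk
      have h1 : l.getD k 0 = g0 := le_antisymm
        (heq ▸ hmono k (arr.length - 1) (by omega) (by omega))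
        (hmono 0 k (by omega) hk)
      have h2' : l.getD 1 0 = g0 := le_antisymm
        (heq ▸ hmono 1 (arr.length - 1) (by omega) (by omega))
        (hmono 0 1 (by omega) (by omega))
      rw [h1, h2', ← hg0]
      ring
    · rw [if_neg (by simp [heq])]
      have hg0L : g0 < gL := lt_of_le_of_ne (hmono 0 (arr.length - 1) (by omega) (by omega)) heq
      have hN1 : 0 < nI - 1 := by rw [hnI]; push_cast; omega
      have hD : 0 < gL - g0 := by omega
      have hcast : ((arr.length - 1 : Nat) : Int) = nI - 1 := by rw [hnI]; omega
      -- consequence of A returning true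
      have hAcf : canFormArithmeticSequence arr = true →
          ∃ d' : Int, 0 < d' ∧ gL - g0 = (nI - 1) * d' ∧
            ∀ k : Nat, k < arr.length → l.getD k 0 = g0 + k * d' := by
        intro hA
        rw [A_true_iff arr h2, ← hldef, ← hg0] at hA
        refine ⟨l.getD 1 0 - g0, ?_, ?_, ?_⟩
        · by_contra hle
          push_neg at hle
          have := hA (arr.length - 1) (by omega)
          rw [← hgL] at this
          have hk : (0 : Int) ≤ ((arr.length - 1 : Nat) : Int) := by positivity
          nlinarith
        · have := hA (arr.length - 1) (by omega)
          rw [← hgL, hcast] at this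
          linarith
        · exact hA
      by_cases hmod : PySem.Int.mod (gL - g0) (nI - 1) = 0
      · obtain ⟨d, hDd⟩ : (nI - 1) ∣ (gL - g0) :=
          (PySem.Int.mod_eq_zero_iff_dvd _ _).mp hmod
        have hd : 0 < d := by nlinarith
        have hfd : PySem.Int.floordiv (gL - g0) (nI - 1) = d := by
          have h0 := PySem.Int.floordiv_mul_add_mod (gL - g0) (nI - 1)
          rw [hmod, add_zero] at h0
          have : PySem.Int.floordiv (gL - g0) (nI - 1) * (nI - 1) = d * (nI - 1) := by
            rw [h0, hDd]; ring
          exact mul_right_cancel₀ (by omega) this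
        rw [if_neg (by simp [hmod]), hfd]
        by_cases hlenS : (PySem.Set.ofList arr).length = arr.length
        · have hOf : PySem.Set.ofList arr = arr := (ofList_sublist arr).eq_of_length hlenS
          rw [if_neg (by simp [PySem.Set.len, hlenS, hnI])]
          have hNd : arr.Nodup := hOf ▸ PySem.Set.nodup_ofList arr
          by_cases hall : ∀ i : Int, 0 ≤ i → i < nI → (g0 + i * d) ∈ arr
          · -- B = true, show A = true
            have hBtrue : (PySem.List.pyRange 0 nI 1).all
                (fun i => PySem.Set.contains (PySem.Set.ofList arr) (g0 + i * d)) = true := by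
              rw [List.all_eq_true]
              intro x hx
              rw [PySem.List.mem_pyRange_one] at hx
              rw [PySem.Set.contains_iff, hOf]
              exact hall x hx.1 hx.2
            rw [hBtrue]
            -- sorted arr is exactly the AP
            have hapnd : (apList g0 d arr.length).Nodup :=
              (apList_pairwise g0 hd arr.length).imp (fun h => ne_of_lt h)
            have hsub : apList g0 d arr.length ⊆ arr := by
              intro y hy
              unfold apList at hy
              rw [List.mem_map] at hy
              obtain ⟨k, hk, rfl⟩ := hy
              rw [List.mem_range] at hk
              exact hall k (by positivity) (by rw [hnI]; exact_mod_cast hk)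
            have hperm : (apList g0 d arr.length).Perm arr :=
              (hapnd.subperm hsub).perm_of_length_le (by rw [apList_length])
            have hlap : l = apList g0 d arr.length := by
              rw [hldef]
              exact PySem.List.sorted_eq_of_perm_of_pairwise_lt arr _ _ hperm
                (apList_pairwise g0 hd arr.length)
            rw [A_true_iff arr h2, ← hldef]
            intro k hk
            rw [hlap, apList_getD g0 d hk, apList_getD g0 d (show 0 < arr.length by omega),
                apList_getD g0 d (show 1 < arr.length by omega)]
            push_cast
            ring
          · -- B = false, show A = false
            push_neg at hall
            obtain ⟨i, hi0, hiN, hnotmem⟩ := hall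
            have hBfalse : (PySem.List.pyRange 0 nI 1).all
                (fun i => PySem.Set.contains (PySem.Set.ofList arr) (g0 + i * d)) = false := by
              rw [Bool.eq_false_iff]
              intro hT
              rw [List.all_eq_true] at hT
              have := hT i (by rw [PySem.List.mem_pyRange_one]; exact ⟨hi0, hiN⟩)
              rw [PySem.Set.contains_iff, hOf] at this
              exact hnotmem this
            rw [hBfalse, Bool.eq_false_iff]
            intro hA
            obtain ⟨d', hd', hDd', hcf⟩ := hAcf hA
            have hdd : d' = d := by
              rw [hDd] at hDd'
              have := mul_left_cancel₀ (show nI - 1 ≠ 0 by omega) hDd'.symm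
              omega
            subst hdd
            have hk : i.toNat < arr.length := by rw [hnI] at hiN; omega
            have := hcf i.toNat hk
            have hmemk := hmem i.toNat hk
            rw [this] at hmemk
            have hci : ((i.toNat : Nat) : Int) = i := by omega
            rw [hci] at hmemk
            exact hnotmem hmemk
        · -- Set.len differs: B = false, show A = false
          rw [if_pos (by
            simp only [PySem.Set.len, bne_iff_ne, ne_eq, hnI]
            exact_mod_cast hlenS)]
          rw [Bool.eq_false_iff]
          intro hA
          obtain ⟨d', hd', hDd', hcf⟩ := hAcf hA
          have hpl : l.Pairwise (· < ·) := by
            rw [List.pairwise_iff_getElem]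
            intro p q hp hq hpq
            rw [← List.getD_eq_getElem _ 0 hp, ← List.getD_eq_getElem _ 0 hq,
                hcf p (by omega), hcf q (by omega)]
            have : (p : Int) < (q : Int) := by exact_mod_cast hpq
            nlinarith
          have hNd : arr.Nodup :=
            ((PySem.List.sorted_perm arr (fun x => x) false).nodup_iff).mp
              (hpl.imp (fun h => ne_of_lt h))
          exact hlenS (by rw [PySem.Set.ofList_eq_self_of_nodup arr hNd])
      · -- mod ≠ 0: B = false, show A = false
        rw [if_pos (by simp [hmod]), Bool.eq_false_iff]
        intro hA
        obtain ⟨d', hd', hDd', hcf⟩ := hAcf hA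
        exact hmod ((PySem.Int.mod_eq_zero_iff_dvd _ _).mpr ⟨d', hDd'⟩)

-- ===== VERDICT (by name: the statement is the Claim_ definition above) =====
theorem canFormArithmeticSequence_spec : Claim_equal_canFormArithmeticSequence := by
  intro arr _
  unfold Spec_canFormArithmeticSequence
  exact canFormArithmeticSequence_eq arr
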